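-- pv_equiv track=rewrite | github.com/princevijay27/infyTQ | assignment7.3.py | find_correct
-- ===== SOURCE A (Python) =====
-- import functools
--
-- def find_correct(word_dict):
--     c=list(functools.reduce(lambda x,y:x+y , word_dict.items()))
--     value=0
--     b=0
--     p={"CORRECT":0,"ALMOST CORRECT":0,"WRONG":0}
--     z=0
--     l=0
--     q=0
--     for i in range(int(len(c)/2)):
--         b=0
--         for j in range(len(c[i+value])):
--             for k in range(len(c[i+value+1])):
--                  if(j==k):
--                      if(c[i+value][j]==c[i+value+1][k]):
--                             b+=1
--
--         if(len(c[i+value]) == b):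
--             z+=1
--             p["CORRECT"]=z
--
--         elif((len(c[i+value])-1) == b or (len(c[i+value])-2) == b):
--             l+=1
--             p["ALMOST CORRECT"]=l
--         else:
--             q+=1
--             p["WRONG"]=q
--         value+=1
--     n=list(map(int,p.values()))
--     return n
-- ===== SOURCE B (Python) =====
-- def find_correct(word_dict):
--     correct = almost = wrong = 0
--     for w1, w2 in word_dict.items():
--         m = sum(a == b for a, b in zip(w1, w2))
--         if m == len(w1):
--             correct += 1
--         elif m >= len(w1) - 2:
--             almost += 1
--         else:
--             wrong += 1
--     return [correct, almost, wrong]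
-- ===== Notes on version B (the rewrite author's own statement) =====
-- stated objective: faster
-- what changed: B replaces A's flattened key/value list with index bookkeeping and its j/k double loop (comparing every index pair and keeping only j==k) by a single pass over the dict items that counts matching positions with one zip per pair, tallying three plain counters instead of a mutated dict.
import Mathlib
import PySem

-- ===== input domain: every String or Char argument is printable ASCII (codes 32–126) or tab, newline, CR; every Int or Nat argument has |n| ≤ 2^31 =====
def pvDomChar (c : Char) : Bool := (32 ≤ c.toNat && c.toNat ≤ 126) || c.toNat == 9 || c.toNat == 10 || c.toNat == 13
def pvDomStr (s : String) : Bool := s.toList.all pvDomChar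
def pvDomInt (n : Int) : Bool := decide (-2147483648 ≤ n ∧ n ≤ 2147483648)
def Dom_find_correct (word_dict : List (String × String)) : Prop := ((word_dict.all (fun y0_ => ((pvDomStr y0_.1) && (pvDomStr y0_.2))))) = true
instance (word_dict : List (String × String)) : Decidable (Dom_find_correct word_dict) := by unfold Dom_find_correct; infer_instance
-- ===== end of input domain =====

-- B replaces A's flattened list + j/k double loop by a single zip pass per pair; asymptotically faster (O(N·L) vs O(N·L²)).

-- ===== PORT A =====
-- A's inner double loop: for j in range(len(w1)): for k in range(len(w2)): if j==k and w1[j]==w2[k]: b+=1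
def pvA_count (w1 w2 : String) : Int :=
  (PySem.List.pyRange 0 (PySem.Str.len w1) 1).foldl (fun b j =>
    (PySem.List.pyRange 0 (PySem.Str.len w2) 1).foldl (fun b k =>
      if j == k then
        if PySem.Str.pyGet? w1 j == PySem.Str.pyGet? w2 k then b + 1 else b
      else b) b) 0

-- A's loop body; state = (value, p, z, l, q)
def pvA_body (c : List String) (st : Int × PySem.Dict String Int × Int × Int × Int) (i : Int) :
    Int × PySem.Dict String Int × Int × Int × Int :=
  let value := st.1; let p := st.2.1; let z := st.2.2.1; let l := st.2.2.2.1; let q := st.2.2.2.2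
  let w1 := PySem.List.pyGetD c (i + value) ""       -- index always in range for the inputs reached
  let w2 := PySem.List.pyGetD c (i + value + 1) ""
  let b := pvA_count w1 w2
  if PySem.Str.len w1 == b then
    (value + 1, p.insert "CORRECT" (z + 1), z + 1, l, q)
  else if (PySem.Str.len w1 - 1 == b) || (PySem.Str.len w1 - 2 == b) then
    (value + 1, p.insert "ALMOST CORRECT" (l + 1), z, l + 1, q)
  else
    (value + 1, p.insert "WRONG" (q + 1), z, l, q + 1)

def find_correct (word_dict : List (String × String)) : List Int :=
  let c : List String := word_dict.foldl (fun x y => x ++ [y.1, y.2]) []   -- reduce(lambda x,y: x+y, items)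
  let p0 : PySem.Dict String Int :=
    ((PySem.Dict.empty.insert "CORRECT" 0).insert "ALMOST CORRECT" 0).insert "WRONG" 0
  let st := (PySem.List.pyRange 0 ((c.length : Int) / 2) 1).foldl (pvA_body c) (0, p0, 0, 0, 0)
  st.2.1.values.map (fun n => n)    -- list(map(int, p.values()))

-- ===== PORT B =====
def pvB_step (acc : Int × Int × Int) (kv : String × String) : Int × Int × Int :=
  let m : Int := ((kv.1.toList.zip kv.2.toList).countP (fun ab => ab.1 == ab.2) : Int)
  if m = (kv.1.toList.length : Int) then (acc.1 + 1, acc.2.1, acc.2.2)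
  else if (kv.1.toList.length : Int) - 2 ≤ m then (acc.1, acc.2.1 + 1, acc.2.2)
  else (acc.1, acc.2.1, acc.2.2 + 1)

def find_correct_alt (word_dict : List (String × String)) : List Int :=
  let r := word_dict.foldl pvB_step (0, 0, 0)
  [r.1, r.2.1, r.2.2]

-- ===== PRECONDITION & SPEC =====
-- Pre_ excludes only the empty dict, on which A raises TypeError (reduce() of an empty iterable).
def Pre_find_correct (word_dict : List (String × String)) : Prop := word_dict ≠ []
instance (word_dict : List (String × String)) : Decidable (Pre_find_correct word_dict) := by unfold Pre_find_correct; infer_instance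
def pvWitness_find_correct : (List (String × String)) := [("ab", "ab")]

def Spec_find_correct (word_dict : List (String × String)) (out : List Int) : Prop := out = find_correct_alt word_dict
instance (word_dict : List (String × String)) (out : List Int) : Decidable (Spec_find_correct word_dict out) := by unfold Spec_find_correct; infer_instance

-- ===== CLAIM (what is proved, stated in full; the proofs are below) =====
def Claim_equal_find_correct : Prop := ∀ (word_dict : List (String × String)), Dom_find_correct word_dict → Pre_find_correct word_dict → Spec_find_correct word_dict (find_correct word_dict)

-- ===== LEMMAS AND PROOFS =====

lemma pv_range_cast (n : Nat) :
    PySem.List.pyRange 0 (n : Int) 1 = (List.range n).map (Nat.cast : Nat → Int) := by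
  rw [PySem.List.pyRange_one]
  simp only [Int.sub_zero, Int.toNat_natCast, zero_add]

lemma pv_flat_length (wd : List (String × String)) :
    (wd.flatMap fun kv => [kv.1, kv.2]).length = 2 * wd.length := by
  induction wd with
  | nil => simp
  | cons a t ih => simp [ih]; omega

lemma pv_foldl_ext {α β : Type} (f g : α → β → α) (l : List β) (h : ∀ a b, f a b = g a b) :
    ∀ a, l.foldl f a = l.foldl g a := by
  induction l with
  | nil => intro a; rfl
  | cons x xs ih => intro a; rw [List.foldl_cons, List.foldl_cons, h, ih]

-- index-based matching-position count equals the zip count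
lemma pv_zipcount : ∀ (l1 l2 : List Char),
    (List.range l1.length).countP (fun k => decide (k < l2.length) && (l1[k]? == l2[k]?))
      = (l1.zip l2).countP (fun ab => ab.1 == ab.2) := by
  intro l1
  induction l1 with
  | nil => intro l2; simp
  | cons x xs ih =>
    intro l2
    cases l2 with
    | nil => simp
    | cons y ys =>
      simp only [List.length_cons]
      rw [List.range_succ_eq_map]
      simp only [List.countP_cons, List.countP_map, Function.comp_def,
        List.getElem?_cons_succ, List.getElem?_cons_zero, List.zip_cons_cons,
        Nat.succ_lt_succ_iff]
      rw [ih ys]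
      simp [Nat.add_comm]

lemma pvA_count_eq (w1 w2 : String) :
    pvA_count w1 w2 = ((w1.toList.zip w2.toList).countP (fun ab => ab.1 == ab.2) : Int) := by
  unfold pvA_count
  simp only [PySem.Str.len_eq, PySem.Str.pyGet?_eq, PySem.Chars.pyGet?_eq_listPyGet?]
  have hinner : ∀ (j b : Int),
      (PySem.List.pyRange 0 (w2.toList.length : Int) 1).foldl
        (fun b k => if j == k then
            if PySem.List.pyGet? w1.toList j == PySem.List.pyGet? w2.toList k then b + 1 else b
          else b) b
      = b + (((PySem.List.pyRange 0 (w2.toList.length : Int) 1).countP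
              (fun k => (k == j) && (PySem.List.pyGet? w1.toList j == PySem.List.pyGet? w2.toList j))) : Int) := by
    intro j b
    have hbody : (fun (b k : Int) => if j == k then
            if PySem.List.pyGet? w1.toList j == PySem.List.pyGet? w2.toList k then b + 1 else b
          else b)
        = (fun (b k : Int) => if ((k == j) && (PySem.List.pyGet? w1.toList j == PySem.List.pyGet? w2.toList j)) then b + 1 else b) := by
      funext b k
      by_cases h : j = k
      · subst h; simp
      · have h2 : ¬ k = j := fun e => h e.symm
        simp [h, h2]
    rw [hbody, PySem.List.foldl_if_add_one]
  have hcount : ∀ (j : Int),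
      ((PySem.List.pyRange 0 (w2.toList.length : Int) 1).countP
          (fun k => (k == j) && (PySem.List.pyGet? w1.toList j == PySem.List.pyGet? w2.toList j)))
      = if ((0 ≤ j ∧ j < (w2.toList.length : Int)) ∧
            (PySem.List.pyGet? w1.toList j == PySem.List.pyGet? w2.toList j) = true) then 1 else 0 := by
    intro j
    by_cases hb : (PySem.List.pyGet? w1.toList j == PySem.List.pyGet? w2.toList j) = true
    · rw [show ((PySem.List.pyRange 0 (w2.toList.length : Int) 1).countP
          (fun k => (k == j) && (PySem.List.pyGet? w1.toList j == PySem.List.pyGet? w2.toList j)))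
          = ((PySem.List.pyRange 0 (w2.toList.length : Int) 1).countP (fun k => k == j)) from by
            apply List.countP_congr; intro x _; simp [hb]]
      rw [show ((PySem.List.pyRange 0 (w2.toList.length : Int) 1).countP (fun k => k == j))
            = (PySem.List.pyRange 0 (w2.toList.length : Int) 1).count j from rfl]
      by_cases hm : j ∈ PySem.List.pyRange 0 (w2.toList.length : Int) 1
      · rw [List.count_eq_one_of_mem (PySem.List.nodup_pyRange_one 0 _) hm]
        have hj := (PySem.List.mem_pyRange_one (x := j) (a := 0) (b := (w2.toList.length : Int))).mp hm
        rw [if_pos ⟨hj, hb⟩]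
      · rw [List.count_eq_zero.mpr hm]
        rw [if_neg (fun hc => hm ((PySem.List.mem_pyRange_one (x := j) (a := 0)
              (b := (w2.toList.length : Int))).mpr ⟨hc.1.1, hc.1.2⟩))]
    · rw [show ((PySem.List.pyRange 0 (w2.toList.length : Int) 1).countP
          (fun k => (k == j) && (PySem.List.pyGet? w1.toList j == PySem.List.pyGet? w2.toList j))) = 0 from by
            apply List.countP_eq_zero.mpr; intro x _; simp [hb]]
      rw [if_neg (fun hc => hb hc.2)]
  refine Eq.trans (pv_foldl_ext _
      (fun (b j : Int) => b + (if ((0 ≤ j ∧ j < (w2.toList.length : Int)) ∧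
          (PySem.List.pyGet? w1.toList j == PySem.List.pyGet? w2.toList j) = true) then (1:Int) else 0))
      _ ?_ 0) ?_
  · intro a b
    refine (hinner b a).trans ?_
    rw [hcount b]
    dsimp only
    split_ifs <;> simp
  rw [PySem.List.foldl_add]
  rw [show ((PySem.List.pyRange 0 (w1.toList.length : Int) 1).map
        (fun j => if ((0 ≤ j ∧ j < (w2.toList.length : Int)) ∧
            (PySem.List.pyGet? w1.toList j == PySem.List.pyGet? w2.toList j) = true) then (1:Int) else 0)).sum
      = (((PySem.List.pyRange 0 (w1.toList.length : Int) 1).countP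
          (fun j => decide (0 ≤ j) && decide (j < (w2.toList.length : Int)) && (PySem.List.pyGet? w1.toList j == PySem.List.pyGet? w2.toList j))) : Int) from by
        rw [← PySem.List.sum_map_ite_one_zero]
        congr 1
        refine List.map_congr_left (fun j _ => ?_)
        by_cases h1 : 0 ≤ j <;> by_cases h2 : j < (w2.toList.length : Int) <;>
          by_cases h3 : (PySem.List.pyGet? w1.toList j == PySem.List.pyGet? w2.toList j) = true <;>
          simp [h1, h2, h3]]
  rw [pv_range_cast, List.countP_map]
  rw [show ((fun j => decide (0 ≤ j) && decide (j < (w2.toList.length : Int)) && (PySem.List.pyGet? w1.toList j == PySem.List.pyGet? w2.toList j)) ∘ (Nat.cast : Nat → Int))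
        = (fun (k : Nat) => decide (k < w2.toList.length) && (w1.toList[k]? == w2.toList[k]?)) from by
      funext k
      simp [Function.comp, PySem.List.pyGet?_natCast, Nat.cast_lt]]
  rw [pv_zipcount]
  simp

-- one A-iteration step agrees with pvB_step (same branch, same tallies)
lemma pv_step (kv : String × String) (z l q : Int) (t2 : Int) (rest : List String) (pre : List String)
    (hpre : (pre.length : Int) = t2 + t2) :
    pvA_body (pre ++ kv.1 :: kv.2 :: rest)
        (t2, PySem.Dict.mk [("CORRECT", z), ("ALMOST CORRECT", l), ("WRONG", q)], z, l, q) t2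
      = (t2 + 1,
         PySem.Dict.mk [("CORRECT", (pvB_step (z, l, q) kv).1),
                        ("ALMOST CORRECT", (pvB_step (z, l, q) kv).2.1),
                        ("WRONG", (pvB_step (z, l, q) kv).2.2)],
         (pvB_step (z, l, q) kv).1, (pvB_step (z, l, q) kv).2.1, (pvB_step (z, l, q) kv).2.2) := by
  have hw1 : PySem.List.pyGetD (pre ++ kv.1 :: kv.2 :: rest) (t2 + t2) "" = kv.1 := by
    rw [← hpre]
    simp [PySem.List.pyGetD_natCast, List.getD]
  have hw2 : PySem.List.pyGetD (pre ++ kv.1 :: kv.2 :: rest) (t2 + t2 + 1) "" = kv.2 := by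
    rw [← hpre, show ((pre.length : Int) + 1) = ((pre.length + 1 : Nat) : Int) from by push_cast; ring]
    rw [PySem.List.pyGetD_natCast, List.getD_eq_getElem?_getD,
      List.getElem?_append_right (by omega : pre.length ≤ pre.length + 1)]
    simp
  have hlen1 : PySem.Str.len kv.1 = (kv.1.length : Int) := by simp
  have hL : kv.1.toList.length = kv.1.length := by simp
  have hm : ((kv.1.toList.zip kv.2.toList).countP (fun ab => ab.1 == ab.2) : Int) ≤ (kv.1.length : Int) := by
    have h1 := List.countP_le_length (l := kv.1.toList.zip kv.2.toList) (p := fun ab => ab.1 == ab.2)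
    have h2 : (kv.1.toList.zip kv.2.toList).length ≤ kv.1.toList.length := by
      rw [List.length_zip]; exact Nat.min_le_left _ _
    rw [← hL]
    exact_mod_cast le_trans h1 h2
  simp only [pvA_body]
  rw [hw1, hw2, pvA_count_eq, hlen1]
  unfold pvB_step
  set m : Int := ((kv.1.toList.zip kv.2.toList).countP (fun ab => ab.1 == ab.2) : Int) with hmdef
  simp only [hL]
  by_cases h1 : m = (kv.1.length : Int)
  · rw [if_pos h1]
    have e1 : ((kv.1.length : Int) == m) = true := by rw [beq_iff_eq]; omega
    simp only [e1, if_true]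
    simp [PySem.Dict.insert]
  · rw [if_neg h1]
    have e1 : ((kv.1.length : Int) == m) = false := by rw [beq_eq_false_iff_ne]; omega
    by_cases h2 : (kv.1.length : Int) - 2 ≤ m
    · rw [if_pos h2]
      have e2 : (((kv.1.length : Int) - 1 == m) || ((kv.1.length : Int) - 2 == m)) = true := by
        simp only [Bool.or_eq_true, beq_iff_eq]
        omega
      simp only [e1, e2, if_true, Bool.false_eq_true, if_false]
      simp [PySem.Dict.insert]
    · rw [if_neg h2]
      have e2 : (((kv.1.length : Int) - 1 == m) || ((kv.1.length : Int) - 2 == m)) = false := by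
        rw [Bool.or_eq_false_iff]
        constructor <;> (rw [beq_eq_false_iff_ne]; omega)
      simp only [e1, e2, Bool.false_eq_true, if_false]
      simp [PySem.Dict.insert]

lemma pv_loopA (L : List (String × String)) :
    ∀ (t : Nat) (pre : List String), pre.length = 2 * t →
    ∀ (z l q : Int),
    (PySem.List.pyRange (t : Int) ((t : Int) + L.length) 1).foldl
        (pvA_body (pre ++ L.flatMap (fun kv => [kv.1, kv.2])))
        ((t : Int), PySem.Dict.mk [("CORRECT", z), ("ALMOST CORRECT", l), ("WRONG", q)], z, l, q)
      = (((t : Int) + L.length),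
         PySem.Dict.mk [("CORRECT", (L.foldl pvB_step (z, l, q)).1),
                        ("ALMOST CORRECT", (L.foldl pvB_step (z, l, q)).2.1),
                        ("WRONG", (L.foldl pvB_step (z, l, q)).2.2)],
         (L.foldl pvB_step (z, l, q)).1, (L.foldl pvB_step (z, l, q)).2.1, (L.foldl pvB_step (z, l, q)).2.2) := by
  induction L with
  | nil =>
    intro t pre hpre z l q
    rw [PySem.List.pyRange_one_eq_nil (by simp)]
    simp
  | cons kv L' ih =>
    intro t pre hpre z l q
    rw [PySem.List.pyRange_one_cons (by simp only [List.length_cons]; push_cast; omega)]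
    rw [List.foldl_cons]
    have hflat : pre ++ ((kv :: L').flatMap fun kv => [kv.1, kv.2])
        = pre ++ kv.1 :: kv.2 :: (L'.flatMap fun kv => [kv.1, kv.2]) := by simp
    rw [hflat]
    rw [pv_step kv z l q ((t : Int)) _ pre (by rw [hpre]; push_cast; ring)]
    have hrw : ((t : Int) + 1) = (((t + 1 : Nat)) : Int) := by push_cast; ring
    have hrng : ((t : Int) + ((kv :: L').length : Int)) = (((t + 1 : Nat)) : Int) + (L'.length : Int) := by
      simp only [List.length_cons]; push_cast; ring
    rw [hrng, hrw]
    have hassoc : pre ++ kv.1 :: kv.2 :: (L'.flatMap fun kv => [kv.1, kv.2])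
        = (pre ++ [kv.1, kv.2]) ++ (L'.flatMap fun kv => [kv.1, kv.2]) := by simp
    rw [hassoc]
    rw [ih (t + 1) (pre ++ [kv.1, kv.2]) (by simp [hpre]; omega)
        (pvB_step (z, l, q) kv).1 (pvB_step (z, l, q) kv).2.1 (pvB_step (z, l, q) kv).2.2]
    simp

-- ===== VERDICT (by name: the statement is the Claim_ definition above) =====
theorem find_correct_spec : Claim_equal_find_correct := by
  intro wd _ _
  unfold Spec_find_correct find_correct find_correct_alt
  dsimp only
  rw [show (wd.foldl (fun x y => x ++ [y.1, y.2]) ([] : List String))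
        = wd.flatMap (fun kv => [kv.1, kv.2]) from by
      rw [PySem.List.foldl_append_eq_flatMap]; simp]
  rw [show (((wd.flatMap (fun kv => [kv.1, kv.2])).length : Int) / 2) = ((wd.length : Nat) : Int) from by
      rw [pv_flat_length]; push_cast; omega]
  rw [show (((PySem.Dict.empty.insert "CORRECT" (0:Int)).insert "ALMOST CORRECT" 0).insert "WRONG" 0)
        = PySem.Dict.mk [("CORRECT", (0:Int)), ("ALMOST CORRECT", (0:Int)), ("WRONG", (0:Int))] from by decide]
  have h := pv_loopA wd 0 [] (by simp) 0 0 0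
  simp only [Nat.cast_zero, zero_add, List.nil_append] at h
  rw [show ((wd.length : Nat) : Int) = (0 : Int) + ((wd.length : Nat) : Int) from by ring] at *
  rw [h]
  simp
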